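-- pv_equiv track=rewrite | github.com/ROMSOC/benchmarks-mip-rail-scheduling | instances/1W_2/set_generation/cliques_generator.py | sorted_max_cliques
-- ===== SOURCE A (Python) =====
-- def sorted_max_cliques(list_of_cliques):
--     ans1 = []
--     for clq in list_of_cliques:
--         ans1.append(sorted(clq))
--     ans = sorted(ans1)
--     ans = sorted(ans, key=len, reverse=True)
--     ans = list(ans)
--     return ans
-- ===== SOURCE B (Python) =====
-- def sorted_max_cliques(list_of_cliques):
--     buckets = {}
--     for clq in list_of_cliques:
--         s = sorted(clq)
--         buckets.setdefault(len(s), []).append(s)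
--     result = []
--     for length in sorted(buckets, reverse=True):
--         result.extend(sorted(buckets[length]))
--     return result
-- ===== Notes on version B (the rewrite author's own statement) =====
-- stated objective: alternative
-- what changed: Replaces the chained lex sort + stable length sort with a dict bucketing cliques by length, then emits each length bucket (lex-sorted) in descending length order.
import Mathlib
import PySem

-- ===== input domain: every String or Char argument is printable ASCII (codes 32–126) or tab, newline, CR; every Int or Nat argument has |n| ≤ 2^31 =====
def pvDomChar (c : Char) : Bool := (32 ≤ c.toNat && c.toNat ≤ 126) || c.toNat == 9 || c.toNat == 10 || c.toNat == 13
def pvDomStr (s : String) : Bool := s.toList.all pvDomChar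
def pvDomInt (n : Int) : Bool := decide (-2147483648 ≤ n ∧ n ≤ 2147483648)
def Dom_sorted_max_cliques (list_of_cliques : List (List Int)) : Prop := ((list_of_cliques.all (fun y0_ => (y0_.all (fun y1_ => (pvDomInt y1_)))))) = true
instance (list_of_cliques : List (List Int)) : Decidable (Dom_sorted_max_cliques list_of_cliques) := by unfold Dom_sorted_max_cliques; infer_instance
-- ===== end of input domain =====

-- B buckets the internally-sorted cliques by length in a dict, then emits each length bucket lex-sorted in descending length order (alternative decomposition, same cost).

-- ===== PORT A =====
def sorted_max_cliques (list_of_cliques : List (List Int)) : List (List Int) :=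
  let ans1 := list_of_cliques.foldl (fun acc clq => acc ++ [PySem.List.sorted clq (fun x => x) false]) []
  let ans := PySem.List.sorted ans1 (fun x => x) false
  let ans := PySem.List.sorted ans (fun x => x.length) true
  ans

-- ===== PORT B =====
def sorted_max_cliques_alt (list_of_cliques : List (List Int)) : List (List Int) :=
  let buckets : PySem.Dict Nat (List (List Int)) :=
    list_of_cliques.foldl (fun d clq =>
      let s := PySem.List.sorted clq (fun x => x) false
      d.modify s.length [] (fun v => v ++ [s])) PySem.Dict.empty
  let lens := PySem.List.sorted buckets.keys (fun x => x) true
  lens.foldl (fun acc n => acc ++ PySem.List.sorted (buckets.getD n []) (fun x => x) false) []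

-- ===== PRECONDITION & SPEC =====
def Spec_sorted_max_cliques (list_of_cliques : List (List Int)) (out : List (List Int)) : Prop := out = sorted_max_cliques_alt list_of_cliques
instance (list_of_cliques : List (List Int)) (out : List (List Int)) : Decidable (Spec_sorted_max_cliques list_of_cliques out) := by unfold Spec_sorted_max_cliques; infer_instance

-- ===== CLAIM (what is proved, stated in full; the proofs are below) =====
def Claim_equal_sorted_max_cliques : Prop := ∀ (list_of_cliques : List (List Int)), Dom_sorted_max_cliques list_of_cliques → Spec_sorted_max_cliques list_of_cliques (sorted_max_cliques list_of_cliques)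

-- ===== LEMMAS AND PROOFS =====

-- the sorted-clique map and the combined key (length descending, then lexicographic)
def pvF (c : List Int) : List Int := PySem.List.sorted c (fun x => x) false
def pvK (x : List Int) : Int ×ₗ List Int := toLex (-(x.length : Int), x)

theorem pvK_injective : Function.Injective pvK := by
  intro a b h
  have := congrArg (fun p => (ofLex p).2) h
  simpa [pvK] using this

-- `sorted` depends on its order instances only through the boolean comparator
theorem insertBy_congr {α : Type} (bf bg : α → α → Bool) (h : ∀ a b, bf a b = bg a b) :
    ∀ (x : α) (ys : List α), PySem.List.insertBy bf x ys = PySem.List.insertBy bg x ys := by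
  intro x ys
  induction ys with
  | nil => rfl
  | cons y ys ih => simp [PySem.List.insertBy, h, ih]

theorem sorted_bool_congr {α κ κ' : Type} [LT κ] [DecidableLT κ] [LT κ'] [DecidableLT κ']
    (key : α → κ) (key' : α → κ')
    (h : ∀ a b : α, decide (key a < key b) = decide (key' a < key' b))
    (xs : List α) (rev : Bool) :
    PySem.List.sorted xs key rev = PySem.List.sorted xs key' rev := by
  have hfun : ∀ (bf bg : α → α → Bool), (∀ a b, bf a b = bg a b) →
      (fun (acc : List α) (x : α) => PySem.List.insertBy bf x acc)
        = (fun acc x => PySem.List.insertBy bg x acc) := by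
    intro bf bg hb
    funext acc x
    exact insertBy_congr bf bg hb x acc
  cases rev with
  | false =>
    rw [PySem.List.sorted_eq_foldl_insertBy, PySem.List.sorted_eq_foldl_insertBy,
      hfun _ _ (fun a b => h a b)]
  | true =>
    rw [PySem.List.sorted_rev_eq_foldl_insertBy, PySem.List.sorted_rev_eq_foldl_insertBy,
      hfun _ _ (fun a b => h b a)]

-- the lexicographic LinearOrder on List ℤ, and the bridge from the port's core `<` to it
@[reducible] def pvLexOrd : LinearOrder (List ℤ) := inferInstance
@[reducible] def pvLexLT : LT (List ℤ) :=
  @Preorder.toLT _ (@PartialOrder.toPreorder _ (@LinearOrder.toPartialOrder _ pvLexOrd))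
@[reducible] def pvLexDecLT : DecidableLT (List ℤ) := @LinearOrder.toDecidableLT _ pvLexOrd

theorem port_sorted_eq (xs : List (List ℤ)) (rev : Bool) :
    PySem.List.sorted xs (fun x => x) rev
      = @PySem.List.sorted _ _ pvLexLT pvLexDecLT xs (fun x => x) rev := by
  refine @sorted_bool_congr (List ℤ) (List ℤ) (List ℤ) _ _ pvLexLT pvLexDecLT
    (fun x => x) (fun x => x) (fun a b => ?_) xs rev
  exact decide_eq_decide.mpr (List.lt_iff_lex_lt a b)

-- Q key R: the order produced by a STABLE descending sort by `key` of a list Pairwise-ordered by R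
theorem insertBy_pairwise {α κ : Type} [LinearOrder κ] (key : α → κ) (R : α → α → Prop)
    (x : α) (acc : List α)
    (hacc : acc.Pairwise (fun a b => key b < key a ∨ (key a = key b ∧ R a b)))
    (hx : ∀ y ∈ acc, R y x) :
    (PySem.List.insertBy (fun a b => decide (key b < key a)) x acc).Pairwise
      (fun a b => key b < key a ∨ (key a = key b ∧ R a b)) := by
  induction acc with
  | nil => simp [PySem.List.insertBy]
  | cons y ys ih =>
    rw [List.pairwise_cons] at hacc
    obtain ⟨hy, hys⟩ := hacc
    by_cases h : key y < key x
    · rw [show PySem.List.insertBy (fun a b => decide (key b < key a)) x (y :: ys)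
          = x :: y :: ys by simp [PySem.List.insertBy, h]]
      refine List.pairwise_cons.mpr ⟨?_, List.pairwise_cons.mpr ⟨hy, hys⟩⟩
      intro z hz
      rcases List.mem_cons.mp hz with rfl | hz'
      · exact Or.inl h
      · rcases hy z hz' with hlt | ⟨heq, _⟩
        · exact Or.inl (hlt.trans h)
        · exact Or.inl (heq ▸ h)
    · rw [show PySem.List.insertBy (fun a b => decide (key b < key a)) x (y :: ys)
          = y :: PySem.List.insertBy (fun a b => decide (key b < key a)) x ys by
          simp [PySem.List.insertBy, h]]
      refine List.pairwise_cons.mpr ⟨?_, ih hys (fun z hz => hx z (List.mem_cons_of_mem _ hz))⟩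
      intro z hz
      rcases (PySem.List.mem_insertBy _ _ _ _).mp hz with rfl | hz'
      · rcases lt_or_eq_of_le (not_lt.mp h) with hlt | heq
        · exact Or.inl hlt
        · exact Or.inr ⟨heq.symm, hx y (List.mem_cons_self)⟩
      · exact hy z hz'

theorem foldl_insertBy_pairwise {α κ : Type} [LinearOrder κ] (key : α → κ) (R : α → α → Prop) :
    ∀ (xs acc : List α),
      acc.Pairwise (fun a b => key b < key a ∨ (key a = key b ∧ R a b)) →
      (∀ y ∈ acc, ∀ x ∈ xs, R y x) → xs.Pairwise R →
      (xs.foldl (fun acc x => PySem.List.insertBy (fun a b => decide (key b < key a)) x acc) acc).Pairwise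
        (fun a b => key b < key a ∨ (key a = key b ∧ R a b)) := by
  intro xs
  induction xs with
  | nil => intro acc h _ _; simpa using h
  | cons x xs ih =>
    intro acc hacc hcross hord
    rw [List.pairwise_cons] at hord
    obtain ⟨hxall, hord'⟩ := hord
    simp only [List.foldl_cons]
    refine ih _ (insertBy_pairwise key R x acc hacc
      (fun y hy => hcross y hy x List.mem_cons_self)) ?_ hord'
    intro y hy z hz
    rcases (PySem.List.mem_insertBy _ _ _ _).mp hy with rfl | hy'
    · exact hxall z hz
    · exact hcross y hy' z (List.mem_cons_of_mem _ hz)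

theorem sorted_rev_stable_pairwise {α κ : Type} [LinearOrder κ] (key : α → κ)
    (R : α → α → Prop) (xs : List α) (hord : xs.Pairwise R) :
    (PySem.List.sorted xs key true).Pairwise (fun a b => key b < key a ∨ (key a = key b ∧ R a b)) := by
  rw [PySem.List.sorted_rev_eq_foldl_insertBy]
  exact foldl_insertBy_pairwise key R xs [] (by simp) (by simp) hord

-- A's output: a permutation of l.map pvF that is Pairwise pvK-nondecreasing
theorem A_perm (l : List (List Int)) : (sorted_max_cliques l).Perm (l.map pvF) := by
  unfold sorted_max_cliques
  simp only [PySem.List.foldl_append_singleton_eq_map, List.nil_append]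
  exact (PySem.List.sorted_perm _ _ _).trans (PySem.List.sorted_perm _ _ _)

theorem A_pairwise (l : List (List Int)) :
    (sorted_max_cliques l).Pairwise (fun a b => pvK a ≤ pvK b) := by
  unfold sorted_max_cliques
  simp only [PySem.List.foldl_append_singleton_eq_map, List.nil_append, port_sorted_eq]
  have h := sorted_rev_stable_pairwise (fun x : List Int => x.length) (fun a b => a ≤ b)
    (@PySem.List.sorted _ _ pvLexLT pvLexDecLT
      (l.map (fun clq => PySem.List.sorted clq (fun x => x) false)) (fun x => x) false)
    (PySem.List.sorted_pairwise _ _)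
  refine h.imp ?_
  intro a b hab
  rw [Prod.Lex.le_iff]
  rcases hab with hlt | ⟨heq, hle⟩
  · exact Or.inl (by simp [pvK]; omega)
  · exact Or.inr ⟨by simp [pvK]; omega, by simpa [pvK] using hle⟩

-- B's buckets, characterized: values are length-filters of l.map pvF, keys their distinct lengths
theorem B_buckets (l : List (List Int)) :
    (l.foldl (fun d clq =>
      let s := PySem.List.sorted clq (fun x => x) false
      d.modify s.length [] (fun v => v ++ [s])) (PySem.Dict.empty : PySem.Dict Nat (List (List Int))))
    = (l.map (fun c => ((pvF c).length, pvF c))).foldl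
        (fun d p => d.modify p.1 [] (fun v => v ++ [p.2])) PySem.Dict.empty := by
  rw [List.foldl_map]
  rfl

theorem B_getD (l : List (List Int)) (n : Nat) :
    ((l.map (fun c => ((pvF c).length, pvF c))).foldl
        (fun d p => d.modify p.1 [] (fun v => v ++ [p.2]))
        (PySem.Dict.empty : PySem.Dict Nat (List (List Int)))).getD n []
    = (l.map pvF).filter (fun y => y.length == n) := by
  rw [PySem.Dict.getD_foldl_modify_append]
  simp [List.filter_map, List.map_map, Function.comp_def]

theorem B_keys (l : List (List Int)) :
    ((l.map (fun c => ((pvF c).length, pvF c))).foldl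
        (fun d p => d.modify p.1 [] (fun v => v ++ [p.2]))
        (PySem.Dict.empty : PySem.Dict Nat (List (List Int)))).keys
    = PySem.Set.ofList ((l.map pvF).map (fun y => y.length)) := by
  have h := PySem.Dict.keys_foldl_modify_key (l := l.map (fun c => ((pvF c).length, pvF c)))
    (key := fun p => p.1) (d0 := ([] : List (List Int)))
    (f := fun _ p => fun v => v ++ [p.2]) (d := PySem.Dict.empty)
  refine h.trans ?_
  simp [PySem.Set.update, PySem.Set.ofList_eq_foldl, List.map_map,
    Function.comp_def, PySem.Dict.empty, PySem.Dict.keys]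

-- generic flatMap lemmas used to reassemble B's output
theorem flatMap_perm_congr {α β : Type} (g h : α → List β) :
    ∀ (ks : List α), (∀ n ∈ ks, (g n).Perm (h n)) → (ks.flatMap g).Perm (ks.flatMap h) := by
  intro ks
  induction ks with
  | nil => intro _; simp
  | cons k ks ih =>
    intro hp
    simp only [List.flatMap_cons]
    exact (hp k List.mem_cons_self).append (ih (fun n hn => hp n (List.mem_cons_of_mem _ hn)))

theorem filters_flatMap_perm :
    ∀ (ks : List Nat) (ys : List (List Int)), ks.Nodup → (∀ y ∈ ys, y.length ∈ ks) →
      (ks.flatMap (fun n => ys.filter (fun y => y.length == n))).Perm ys := by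
  intro ks
  induction ks with
  | nil =>
    intro ys _ hmem
    have : ys = [] := List.eq_nil_iff_forall_not_mem.mpr (fun y hy => by simpa using hmem y hy)
    simp [this]
  | cons n ks ih =>
    intro ys hnd hmem
    rw [List.nodup_cons] at hnd
    simp only [List.flatMap_cons]
    have hrest : (ks.flatMap (fun m => ys.filter (fun y => y.length == m)))
        = ks.flatMap (fun m => (ys.filter (fun y => !(y.length == n))).filter (fun y => y.length == m)) := by
      refine List.flatMap_congr (fun m hm => ?_)
      rw [List.filter_filter]
      refine (List.filter_congr (fun y _ => ?_)).symm
      by_cases h : y.length = m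
      · have hmn : m ≠ n := fun hc => hnd.1 (hc ▸ hm)
        simp [h, hmn]
      · simp [h]
    rw [hrest]
    have hmem' : ∀ y ∈ ys.filter (fun y => !(y.length == n)), y.length ∈ ks := by
      intro y hy
      rw [List.mem_filter] at hy
      rcases List.mem_cons.mp (hmem y hy.1) with h | h
      · exact absurd h (by simpa using hy.2)
      · exact h
    have hperm := ih (ys.filter (fun y => !(y.length == n))) hnd.2 hmem'
    exact (hperm.append_left _).trans (List.filter_append_perm _ ys)

theorem B_flatMap (l : List (List Int)) :
    sorted_max_cliques_alt l
    = (PySem.List.sorted (PySem.Set.ofList ((l.map pvF).map (fun y => y.length))) (fun x => x) true).flatMap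
        (fun n => PySem.List.sorted ((l.map pvF).filter (fun y => y.length == n)) (fun x => x) false) := by
  unfold sorted_max_cliques_alt
  simp only [B_buckets, B_keys]
  rw [PySem.List.foldl_append_eq_flatMap, List.nil_append]
  exact List.flatMap_congr (fun n _ => by rw [B_getD])

theorem lens_pairwise_gt (l : List (List Int)) :
    (PySem.List.sorted (PySem.Set.ofList ((l.map pvF).map (fun y => y.length))) (fun x : Nat => x) true).Pairwise
      (fun a b => b < a) := by
  have hnd : (PySem.List.sorted (PySem.Set.ofList ((l.map pvF).map (fun y => y.length))) (fun x : Nat => x) true).Nodup :=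
    (PySem.List.sorted_perm _ _ _).nodup_iff.mpr (PySem.Set.nodup_ofList _)
  have hord := PySem.List.sorted_pairwise_rev (PySem.Set.ofList ((l.map pvF).map (fun y => y.length))) (fun x : Nat => x)
  exact (hord.and hnd).imp (fun {a b} h => lt_of_le_of_ne h.1 (fun hc => h.2 hc.symm))

theorem B_perm (l : List (List Int)) : (sorted_max_cliques_alt l).Perm (l.map pvF) := by
  rw [B_flatMap]
  refine (flatMap_perm_congr _ _ _ (fun n _ => PySem.List.sorted_perm _ _ _)).trans ?_
  refine filters_flatMap_perm _ _ ((PySem.List.sorted_perm _ _ _).nodup_iff.mpr (PySem.Set.nodup_ofList _)) ?_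
  intro y hy
  rw [PySem.List.mem_sorted]
  exact (PySem.Set.mem_ofList _ _).mpr (List.mem_map_of_mem hy)

theorem len_of_mem_sorted_filter {κ : Type} (instLT : LT κ) (instDec : DecidableLT κ)
    (key : List ℤ → κ) (rev : Bool) (ys : List (List ℤ)) (n : Nat) (x : List ℤ)
    (hx : x ∈ @PySem.List.sorted _ _ instLT instDec (ys.filter (fun y => y.length == n)) key rev) :
    x.length = n := by
  have := (List.mem_filter.mp ((PySem.List.mem_sorted _ _ _ _).mp hx)).2
  simpa using this

theorem flatMap_pairwise {α β : Type} (R : β → β → Prop) (g : α → List β) :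
    ∀ (ks : List α), (∀ n ∈ ks, (g n).Pairwise R) →
      ks.Pairwise (fun m n => ∀ x ∈ g m, ∀ y ∈ g n, R x y) →
      (ks.flatMap g).Pairwise R := by
  intro ks
  induction ks with
  | nil => intro _ _; simp
  | cons k ks ih =>
    intro hin hcross
    rw [List.pairwise_cons] at hcross
    rw [List.flatMap_cons, List.pairwise_append]
    refine ⟨hin k List.mem_cons_self, ih (fun n hn => hin n (List.mem_cons_of_mem _ hn)) hcross.2, ?_⟩
    intro x hx y hy
    obtain ⟨n, hn, hyn⟩ := List.mem_flatMap.mp hy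
    exact hcross.1 n hn x hx y hyn

theorem B_pairwise (l : List (List Int)) :
    (sorted_max_cliques_alt l).Pairwise (fun a b => pvK a ≤ pvK b) := by
  rw [B_flatMap]
  refine flatMap_pairwise _ _ _ ?_ ?_
  · intro n _
    rw [port_sorted_eq]
    have hsp := @PySem.List.sorted_pairwise (List ℤ) (List ℤ) pvLexOrd
      ((l.map pvF).filter (fun y => y.length == n)) (fun x => x)
    refine List.Pairwise.imp_of_mem ?_ hsp
    intro a b ha hb hab
    have hlena := len_of_mem_sorted_filter _ _ _ _ _ _ _ ha
    have hlenb := len_of_mem_sorted_filter _ _ _ _ _ _ _ hb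
    rw [Prod.Lex.le_iff]
    exact Or.inr ⟨by simp [pvK, hlena, hlenb], by simpa [pvK] using hab⟩
  · refine (lens_pairwise_gt l).imp ?_
    intro m n hmn x hx y hy
    have hlx := len_of_mem_sorted_filter _ _ _ _ _ _ _ hx
    have hly := len_of_mem_sorted_filter _ _ _ _ _ _ _ hy
    rw [Prod.Lex.le_iff]
    refine Or.inl ?_
    simp [pvK, hlx, hly]
    omega

theorem AB_eq (l : List (List Int)) : sorted_max_cliques l = sorted_max_cliques_alt l :=
  PySem.List.eq_of_perm_of_pairwise_le_of_injective pvK pvK_injective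
    ((A_perm l).trans (B_perm l).symm) (A_pairwise l) (B_pairwise l)

-- ===== VERDICT (by name: the statement is the Claim_ definition above) =====
theorem sorted_max_cliques_spec : Claim_equal_sorted_max_cliques := by
  intro l _
  exact AB_eq l
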